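-- pv_equiv track=rewrite | github.com/leon4rdmtg/prog2 | alejandro/Practico_II/implemt_algort/cine.py | buscar_asientos_juntos
-- ===== SOURCE A (Python) =====
-- def buscar_asientos_juntos(sala, cantidad):
--     for i, fila in enumerate(sala):
--         consecutivos = 0
--         inicio = 0
--         for j, asiento in enumerate(fila):
--             if asiento["estado"] == "L":
--                 if consecutivos == 0:
--                     inicio = j
--                 consecutivos += 1
--                 if consecutivos == cantidad:
--                     return i, inicio
--             else:
--                 consecutivos = 0
--     return None, None
-- ===== SOURCE B (Python) =====
-- def buscar_asientos_juntos(sala, cantidad):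
--     # For each row, render seat states as a string and substring-search for a
--     # block of `cantidad` free seats.  A row can only hold the block if
--     # 0 < cantidad <= len(fila).
--     for i, fila in enumerate(sala):
--         if not 0 < cantidad <= len(fila):
--             continue
--         estados = "".join("L" if asiento["estado"] == "L" else "." for asiento in fila)
--         idx = estados.find("L" * cantidad)
--         if idx != -1:
--             return i, idx
--     return None, None
-- ===== Notes on version B (the rewrite author's own statement) =====
-- stated objective: idiomatic
-- what changed: Replaces A's manual consecutive-run counter with per-row rendering of seat states into a string and a substring search for 'L'*cantidad, guarded by the natural per-row fit test 0 < cantidad <= len(fila).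
-- outside the precondition, e.g. on buscar_asientos_juntos([[{'estado': 'L'}, {}]], 1): A returns (0, 0), B raises KeyError; on buscar_asientos_juntos([[{'estado': 'L'}], [{}]], 1): A returns (0, 0), B returns (0, 0)
import Mathlib
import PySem

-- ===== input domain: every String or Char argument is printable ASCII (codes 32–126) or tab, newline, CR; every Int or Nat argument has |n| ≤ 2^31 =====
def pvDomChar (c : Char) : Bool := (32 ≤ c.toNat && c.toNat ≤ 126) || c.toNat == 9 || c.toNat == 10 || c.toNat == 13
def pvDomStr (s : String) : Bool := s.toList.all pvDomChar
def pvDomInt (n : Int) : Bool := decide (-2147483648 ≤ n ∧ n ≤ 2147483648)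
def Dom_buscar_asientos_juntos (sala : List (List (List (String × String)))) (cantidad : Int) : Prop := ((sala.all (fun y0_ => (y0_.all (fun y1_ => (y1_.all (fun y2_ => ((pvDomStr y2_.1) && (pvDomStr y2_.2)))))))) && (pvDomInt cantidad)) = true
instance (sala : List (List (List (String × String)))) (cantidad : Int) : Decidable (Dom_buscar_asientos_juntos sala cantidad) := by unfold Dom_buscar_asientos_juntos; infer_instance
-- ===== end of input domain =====

-- B replaces A's manual consecutive-run counter by rendering each row's seat
-- states as a character string and substring-searching for a block of
-- `cantidad` free seats (objective: idiomatic; return value only, no mutation).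

-- ===== PORT A =====
-- outcome of A's inner row loop: early return, KeyError, or fall-through
inductive PyRowRes where
  | found (inicio : Int)
  | err
  | clean
deriving DecidableEq, Repr

def pyAInner (fila : List (List (String × String))) (j consecutivos inicio cantidad : Int) : PyRowRes :=
  match fila with
  | [] => .clean
  | asiento :: rest =>
    match asiento.lookup "estado" with
    | none => .err                      -- Python raises KeyError here (excluded by Pre_)
    | some e =>
      if e = "L" then
        let inicio' := if consecutivos = 0 then j else inicio
        let c' := consecutivos + 1
        if c' = cantidad then .found inicio'
        else pyAInner rest (j + 1) c' inicio' cantidad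
      else pyAInner rest (j + 1) 0 inicio cantidad

def pyAOuter (sala : List (List (List (String × String)))) (i cantidad : Int) : Option Int × Option Int :=
  match sala with
  | [] => (none, none)
  | fila :: rest =>
    match pyAInner fila 0 0 0 cantidad with
    | .found inicio => (some i, some inicio)
    | .err => (none, none)              -- unreachable under Pre_ (Python raises)
    | .clean => pyAOuter rest (i + 1) cantidad

def buscar_asientos_juntos (sala : List (List (List (String × String)))) (cantidad : Int) : Option Int × Option Int :=
  pyAOuter sala 0 cantidad

-- ===== PORT B =====
-- "L" if asiento["estado"] == "L" else "."
def pyBEstado (asiento : List (String × String)) : Char :=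
  if (asiento.lookup "estado").getD "" = "L" then 'L' else '.'

def pyBOuter (sala : List (List (List (String × String)))) (i cantidad : Int) : Option Int × Option Int :=
  match sala with
  | [] => (none, none)
  | fila :: rest =>
    if 0 < cantidad ∧ cantidad ≤ (fila.length : Int) then
      let estados := fila.map pyBEstado
      let idx := PySem.Chars.find estados (List.replicate cantidad.toNat 'L')
      if idx ≠ -1 then (some i, some idx) else pyBOuter rest (i + 1) cantidad
    else pyBOuter rest (i + 1) cantidad

def buscar_asientos_juntos_alt (sala : List (List (List (String × String)))) (cantidad : Int) : Option Int × Option Int :=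
  pyBOuter sala 0 cantidad

-- ===== PRECONDITION & SPEC =====
-- Pre_ excludes every input in which some seat dict lacks the key "estado": whichever
-- program first reaches such a seat raises KeyError (A seat by seat, B row by row, so
-- B raises on some inputs where A returns early); when the keyless seat lies beyond the
-- returning row neither raises and both agree, but Pre_ keeps the simple closed form.
def Pre_buscar_asientos_juntos (sala : List (List (List (String × String)))) (cantidad : Int) : Prop :=
  (sala.all (fun fila => fila.all (fun asiento => (asiento.lookup "estado").isSome))) = true
instance (sala : List (List (List (String × String)))) (cantidad : Int) : Decidable (Pre_buscar_asientos_juntos sala cantidad) := by unfold Pre_buscar_asientos_juntos; infer_instance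

def pvWitness_buscar_asientos_juntos : (List (List (List (String × String)))) × Int :=
  ([[[("estado", "L")], [("estado", "O")], [("estado", "L")], [("estado", "L")]]], 2)

def Spec_buscar_asientos_juntos (sala : List (List (List (String × String)))) (cantidad : Int) (out : Option Int × Option Int) : Prop := out = buscar_asientos_juntos_alt sala cantidad
instance (sala : List (List (List (String × String)))) (cantidad : Int) (out : Option Int × Option Int) : Decidable (Spec_buscar_asientos_juntos sala cantidad out) := by unfold Spec_buscar_asientos_juntos; infer_instance

-- ===== CLAIM (what is proved, stated in full; the proofs are below) =====
def Claim_equal_buscar_asientos_juntos : Prop := ∀ (sala : List (List (List (String × String)))) (cantidad : Int), Dom_buscar_asientos_juntos sala cantidad → Pre_buscar_asientos_juntos sala cantidad → Spec_buscar_asientos_juntos sala cantidad (buscar_asientos_juntos sala cantidad)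

-- ===== LEMMAS AND PROOFS =====

-- A seat is free iff its "estado" entry is "L"
def pvIsFree (asiento : List (String × String)) : Bool := (asiento.lookup "estado").getD "" == "L"

-- A's inner loop, abstracted to the row's free/occupied pattern
def pvScan (bs : List Bool) (j cons inicio cantidad : Int) : Option Int :=
  match bs with
  | [] => none
  | b :: t =>
    if b then
      let inicio' := if cons = 0 then j else inicio
      if cons + 1 = cantidad then some inicio'
      else pvScan t (j + 1) (cons + 1) inicio' cantidad
    else pvScan t (j + 1) 0 inicio cantidad

-- index of the first window of k consecutive `true`s
def pvWin (k : Nat) : List Bool → Option Nat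
  | [] => none
  | b :: t =>
    if k ≤ (b :: t).length ∧ ((b :: t).take k).all id then some 0
    else (pvWin k t).map (· + 1)

-- window predicate
def PvW (k : Nat) (bs : List Bool) (p : Nat) : Prop := List.replicate k true <+: bs.drop p

theorem pvWin_cons (k : Nat) (b : Bool) (t : List Bool) :
    pvWin k (b :: t) = if k ≤ (b :: t).length ∧ ((b :: t).take k).all id then some 0
      else (pvWin k t).map (· + 1) := rfl

theorem pvW_iff (k : Nat) (hk : 1 ≤ k) (bs : List Bool) (p : Nat) :
    PvW k bs p ↔ k + p ≤ bs.length ∧ ((bs.drop p).take k).all id = true := by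
  unfold PvW
  rw [List.prefix_iff_eq_take, List.length_replicate, eq_comm, List.eq_replicate_iff]
  simp only [List.length_take, List.length_drop, List.all_eq_true, id_eq]
  constructor
  · rintro ⟨h1, h2⟩; exact ⟨by omega, h2⟩
  · rintro ⟨h1, h2⟩; exact ⟨by omega, h2⟩

theorem pvWin_spec (k : Nat) (hk : 1 ≤ k) : ∀ bs : List Bool,
    (∀ p, pvWin k bs = some p → PvW k bs p ∧ ∀ q < p, ¬ PvW k bs q) ∧
    (pvWin k bs = none → ∀ p, ¬ PvW k bs p) := by
  intro bs
  induction bs with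
  | nil =>
    refine ⟨fun p h => by simp [pvWin] at h, fun _ p hw => ?_⟩
    rw [pvW_iff k hk] at hw
    simp at hw
    omega
  | cons b t ih =>
    by_cases hc : k ≤ (b :: t).length ∧ ((b :: t).take k).all id
    · have hwin : pvWin k (b :: t) = some 0 := by rw [pvWin_cons, if_pos hc]
      refine ⟨fun p h => ?_, fun h => ?_⟩
      · rw [hwin] at h
        obtain rfl : p = 0 := by injection h.symm
        refine ⟨?_, fun q hq => absurd hq (by omega)⟩
        rw [pvW_iff k hk]
        exact ⟨by simpa using hc.1, by simpa using hc.2⟩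
      · rw [hwin] at h; exact absurd h (by simp)
    · have hrec : pvWin k (b :: t) = (pvWin k t).map (· + 1) := by
        rw [pvWin_cons, if_neg hc]
      have hnot0 : ¬ PvW k (b :: t) 0 := by
        intro hw
        rw [pvW_iff k hk] at hw
        exact hc ⟨by simpa using hw.1, by simpa using hw.2⟩
      refine ⟨fun p h => ?_, fun h p => ?_⟩
      · rw [hrec, Option.map_eq_some_iff] at h
        obtain ⟨p', hp', rfl⟩ := h
        obtain ⟨hw', hmin'⟩ := ih.1 p' hp'
        refine ⟨?_, fun q hq => ?_⟩
        · unfold PvW at hw' ⊢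
          rwa [List.drop_succ_cons]
        · match q with
          | 0 => exact hnot0
          | q' + 1 =>
            intro hw
            unfold PvW at hw
            rw [List.drop_succ_cons] at hw
            exact hmin' q' (by omega) hw
      · rw [hrec, Option.map_eq_none_iff] at h
        match p with
        | 0 => exact hnot0
        | q' + 1 =>
          intro hw
          unfold PvW at hw
          rw [List.drop_succ_cons] at hw
          exact ih.2 h q' hw

theorem pvWin_eq_some_iff (k : Nat) (hk : 1 ≤ k) (bs : List Bool) (p : Nat) :
    pvWin k bs = some p ↔ (PvW k bs p ∧ ∀ q < p, ¬ PvW k bs q) := by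
  constructor
  · exact (pvWin_spec k hk bs).1 p
  · rintro ⟨hw, hmin⟩
    cases hwin : pvWin k bs with
    | none => exact absurd hw ((pvWin_spec k hk bs).2 hwin p)
    | some p' =>
      obtain ⟨hw', hmin'⟩ := (pvWin_spec k hk bs).1 p' hwin
      have h1 : ¬ p' < p := fun h => hmin p' h hw'
      have h2 : ¬ p < p' := fun h => hmin' p h hw
      have : p = p' := by omega
      rw [this]

theorem pvWin_eq_none_iff (k : Nat) (hk : 1 ≤ k) (bs : List Bool) :
    pvWin k bs = none ↔ ∀ p, ¬ PvW k bs p := by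
  constructor
  · exact (pvWin_spec k hk bs).2
  · intro h
    cases hwin : pvWin k bs with
    | none => rfl
    | some p' => exact absurd ((pvWin_spec k hk bs).1 p' hwin).1 (h p')

theorem pvW_shift (k n : Nat) (l₁ l₂ : List Bool) :
    PvW k (l₁ ++ l₂) (l₁.length + n) ↔ PvW k l₂ n := by
  unfold PvW
  rw [List.drop_append, List.drop_eq_nil_of_le (by omega), Nat.add_sub_cancel_left,
    List.nil_append]

theorem pvWin_replicate (k cons : Nat) (hk : 1 ≤ k) (h : cons < k) :
    pvWin k (List.replicate cons true) = none := by
  rw [pvWin_eq_none_iff k hk]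
  intro p hw
  rw [pvW_iff k hk] at hw
  simp at hw
  omega

theorem pvW_covers_false (k cons : Nat) (hk : 1 ≤ k) (h : cons < k) (t : List Bool) (q : Nat)
    (hq : q ≤ cons) : ¬ PvW k (List.replicate cons true ++ false :: t) q := by
  intro hw
  rw [pvW_iff k hk] at hw
  obtain ⟨hlen, hall⟩ := hw
  simp only [List.length_append, List.length_replicate, List.length_cons] at hlen
  have hdrop : (List.replicate cons true ++ false :: t).drop q
      = List.replicate (cons - q) true ++ false :: t := by
    rw [List.drop_append_of_le_length (by simpa using hq), List.drop_replicate]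
  have hmem : false ∈ ((List.replicate cons true ++ false :: t).drop q).take k := by
    rw [hdrop, List.take_append]
    refine List.mem_append_right _ ?_
    simp only [List.length_replicate]
    obtain ⟨m, hm⟩ : ∃ m, k - (cons - q) = m + 1 := ⟨k - (cons - q) - 1, by omega⟩
    rw [hm, List.take_succ_cons]
    simp
  rw [List.all_eq_true] at hall
  simpa using hall false hmem

theorem pvWin_blocked (k cons : Nat) (hk : 1 ≤ k) (h : cons < k) (t : List Bool) :
    pvWin k (List.replicate cons true ++ false :: t) = (pvWin k t).map (· + (cons + 1)) := by
  have hsplit : List.replicate cons true ++ false :: t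
      = (List.replicate cons true ++ [false]) ++ t := by
    simp
  have hlen1 : (List.replicate cons true ++ [false]).length = cons + 1 := by simp
  cases hwt : pvWin k t with
  | none =>
    rw [Option.map_none, pvWin_eq_none_iff k hk]
    intro p hw
    by_cases hp : p ≤ cons
    · exact pvW_covers_false k cons hk h t p hp hw
    · obtain ⟨q', hq'⟩ : ∃ q', p = (cons + 1) + q' := ⟨p - (cons + 1), by omega⟩
      rw [hsplit, hq', ← hlen1] at hw
      rw [pvW_shift] at hw
      exact (pvWin_eq_none_iff k hk t).1 hwt q' hw
  | some p' =>
    obtain ⟨hw', hmin'⟩ := (pvWin_spec k hk t).1 p' hwt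
    rw [Option.map_some, pvWin_eq_some_iff k hk]
    constructor
    · rw [hsplit]
      have : p' + (cons + 1) = (List.replicate cons true ++ [false]).length + p' := by
        rw [hlen1]; omega
      rw [this, pvW_shift]
      exact hw'
    · intro q hq hw
      by_cases hqc : q ≤ cons
      · exact pvW_covers_false k cons hk h t q hqc hw
      · obtain ⟨q', hq'⟩ : ∃ q', q = (cons + 1) + q' := ⟨q - (cons + 1), by omega⟩
        rw [hsplit, hq', ← hlen1, pvW_shift] at hw
        exact hmin' q' (by omega) hw

theorem pvScan_nonpos (c : Int) (hc : c ≤ 0) : ∀ (bs : List Bool) (j cons inicio : Int),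
    0 ≤ cons → pvScan bs j cons inicio c = none := by
  intro bs
  induction bs with
  | nil => intro j cons inicio _; rfl
  | cons b t ih =>
    intro j cons inicio hcons
    by_cases hb : b = true
    · have hne : ¬ (cons + 1 = c) := by omega
      simp only [pvScan, hb, if_true, hne, if_false]
      exact ih (j + 1) (cons + 1) _ (by omega)
    · simp only [pvScan, hb, if_false]
      exact ih (j + 1) 0 inicio (by omega)

theorem pvScan_eq (k : Nat) (hk : 1 ≤ k) : ∀ (bs : List Bool) (j inicio : Int) (cons : Nat),
    cons < k → (cons = 0 ∨ inicio = j - cons) →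
    pvScan bs j (cons : Int) inicio (k : Int) =
      (pvWin k (List.replicate cons true ++ bs)).map (fun p : Nat => j - cons + (p : Int)) := by
  intro bs
  induction bs with
  | nil =>
    intro j inicio cons hck hinv
    rw [List.append_nil, pvWin_replicate k cons hk hck]
    rfl
  | cons b t ih =>
    intro j inicio cons hck hinv
    have hinicio' : (if (cons : Int) = 0 then j else inicio) = j - cons := by
      rcases hinv with h0 | hi
      · subst h0; simp
      · rcases Nat.eq_zero_or_pos cons with h0 | hpos
        · subst h0; simp
        · rw [if_neg (by exact_mod_cast Nat.pos_iff_ne_zero.mp hpos), hi]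
    by_cases hb : b = true
    · subst hb
      by_cases hck1 : cons + 1 = k
      · have hcint : (cons : Int) + 1 = (k : Int) := by omega
        simp only [pvScan, if_true, hcint]
        have hE : List.replicate cons true ++ true :: t = List.replicate k true ++ t := by
          rw [← hck1, List.replicate_succ']
          simp
        rw [hE]
        have hwin : pvWin k (List.replicate k true ++ t) = some 0 := by
          rw [pvWin_eq_some_iff k hk]
          refine ⟨?_, fun q hq => absurd hq (by omega)⟩
          rw [pvW_iff k hk]
          constructor
          · simp
          · simp [List.take_append, List.take_replicate]
        rw [hwin]
        simp only [Option.map_some, Nat.cast_zero, add_zero, Option.some.injEq]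
        by_cases h0 : cons = 0
        · subst h0; simp
        · rw [if_neg (by exact_mod_cast h0)]
          rw [if_neg (by exact_mod_cast h0)] at hinicio'
          exact hinicio'
      · have hcint : ¬ ((cons : Int) + 1 = (k : Int)) := by omega
        simp only [pvScan, if_true, if_neg hcint]
        have harg : (cons : Int) + 1 = ((cons + 1 : Nat) : Int) := by push_cast; ring
        rw [hinicio', harg]
        have hrec := ih (j + 1) (j - cons) (cons + 1) (by omega)
          (Or.inr (by push_cast; ring))
        rw [hrec]
        have hE : List.replicate cons true ++ true :: t
            = List.replicate (cons + 1) true ++ t := by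
          rw [List.replicate_succ']
          simp
        rw [hE]
        congr 1
        funext p
        push_cast
        ring
    · have hb' : b = false := by simpa using hb
      subst hb'
      simp only [pvScan, Bool.false_eq_true, if_false]
      have hrec := ih (j + 1) inicio 0 (by omega) (Or.inl rfl)
      simp only [Nat.cast_zero] at hrec
      rw [hrec, pvWin_blocked k cons hk hck t]
      simp only [List.replicate_zero, List.nil_append, Option.map_map]
      congr 1
      funext p
      simp only [Function.comp_apply]
      push_cast
      ring

theorem pvInner_eq_scan (cantidad : Int) : ∀ (fila : List (List (String × String))) (j cons inicio : Int),
    fila.all (fun a => (a.lookup "estado").isSome) = true →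
    pyAInner fila j cons inicio cantidad =
      (match pvScan (fila.map pvIsFree) j cons inicio cantidad with
       | some p => .found p
       | none => .clean) := by
  intro fila
  induction fila with
  | nil => intro j cons inicio _; rfl
  | cons a rest ih =>
    intro j cons inicio hkey
    rw [List.all_cons, Bool.and_eq_true] at hkey
    obtain ⟨hka, hkrest⟩ := hkey
    obtain ⟨e, he⟩ := Option.isSome_iff_exists.mp hka
    have hfree : pvIsFree a = (e == "L") := by
      simp [pvIsFree, he]
    by_cases heL : e = "L"
    · subst heL
      simp only [pyAInner, he, List.map_cons, hfree, beq_self_eq_true, pvScan, if_true]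
      by_cases hcc : cons + 1 = cantidad
      · simp [hcc]
      · simp only [if_neg hcc]
        exact ih (j + 1) (cons + 1) _ hkrest
    · have hfree' : pvIsFree a = false := by
        rw [hfree]; simpa using heL
      simp only [pyAInner, he, if_neg heL, List.map_cons, hfree', pvScan, Bool.false_eq_true,
        if_false]
      exact ih (j + 1) 0 inicio hkrest

theorem pvPrefix_map (k : Nat) (bs : List Bool) (p : Nat) :
    (List.replicate k 'L' <+: (bs.map (fun b => if b then 'L' else '.')).drop p) ↔ PvW k bs p := by
  have hinj : Function.Injective (fun b : Bool => if b then 'L' else '.') := by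
    intro x y hxy
    cases x <;> cases y <;> simp_all
  unfold PvW
  rw [← List.map_drop, List.prefix_iff_eq_take, List.prefix_iff_eq_take]
  simp only [List.length_replicate, ← List.map_take]
  have hrepl : List.replicate k 'L'
      = (List.replicate k true).map (fun b : Bool => if b then 'L' else '.') := by
    simp [List.map_replicate]
  rw [hrepl]
  exact (List.map_injective_iff.mpr hinj).eq_iff

theorem pvFind_eq_win (k : Nat) (hk : 1 ≤ k) (bs : List Bool) :
    PySem.Chars.find (bs.map (fun b => if b then 'L' else '.')) (List.replicate k 'L') =
      (match pvWin k bs with | some p => (p : Int) | none => -1) := by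
  cases hw : pvWin k bs with
  | none =>
    rw [PySem.Chars.find_eq_neg_one_iff]
    intro hinfix
    have hisin := (PySem.Chars.isIn_iff_infix _ _).mpr hinfix
    obtain ⟨j, hj⟩ := (PySem.Chars.exists_prefix_drop_iff_isIn _ _).mpr hisin
    rw [pvPrefix_map k bs j] at hj
    exact (pvWin_eq_none_iff k hk bs).1 hw j hj
  | some p =>
    obtain ⟨hwp, hmin⟩ := (pvWin_spec k hk bs).1 p hw
    have hinfix : List.replicate k 'L' <:+: bs.map (fun b => if b then 'L' else '.') := by
      rw [← PySem.Chars.isIn_iff_infix,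
        ← PySem.Chars.exists_prefix_drop_iff_isIn]
      exact ⟨p, (pvPrefix_map k bs p).mpr hwp⟩
    have hnn : 0 ≤ PySem.Chars.find (bs.map (fun b => if b then 'L' else '.'))
        (List.replicate k 'L') := (PySem.Chars.find_nonneg_iff _ _).mpr hinfix
    obtain ⟨hpre, hmin'⟩ := PySem.Chars.find_spec hnn
    set F := (PySem.Chars.find (bs.map (fun b => if b then 'L' else '.'))
      (List.replicate k 'L')).toNat with hF
    have hwF : PvW k bs F := (pvPrefix_map k bs F).mp hpre
    have h1 : ¬ F < p := fun hlt => hmin F hlt hwF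
    have h2 : ¬ p < F := fun hlt => hmin' p hlt ((pvPrefix_map k bs p).mpr hwp)
    have hpF : p = F := by omega
    rw [← Int.toNat_of_nonneg hnn, ← hF, ← hpF]

theorem pvStates_eq (fila : List (List (String × String))) :
    fila.map pyBEstado = (fila.map pvIsFree).map (fun b => if b then 'L' else '.') := by
  rw [List.map_map]
  apply List.map_congr_left
  intro a _
  simp only [Function.comp_apply, pyBEstado, pvIsFree]
  by_cases h : (a.lookup "estado").getD "" = "L" <;> simp [h]

theorem pyAOuter_cons (fila : List (List (String × String)))
    (rest : List (List (List (String × String)))) (i cantidad : Int) :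
    pyAOuter (fila :: rest) i cantidad =
      (match pyAInner fila 0 0 0 cantidad with
       | .found inicio => (some i, some inicio)
       | .err => (none, none)
       | .clean => pyAOuter rest (i + 1) cantidad) := rfl

theorem pyBOuter_cons (fila : List (List (String × String)))
    (rest : List (List (List (String × String)))) (i cantidad : Int) :
    pyBOuter (fila :: rest) i cantidad =
      if 0 < cantidad ∧ cantidad ≤ (fila.length : Int) then
        if PySem.Chars.find (fila.map pyBEstado) (List.replicate cantidad.toNat 'L') ≠ -1 then
          (some i, some (PySem.Chars.find (fila.map pyBEstado) (List.replicate cantidad.toNat 'L')))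
        else pyBOuter rest (i + 1) cantidad
      else pyBOuter rest (i + 1) cantidad := rfl

theorem pvOuter_eq (cantidad : Int) : ∀ (sala : List (List (List (String × String)))) (i : Int),
    (sala.all (fun fila => fila.all (fun asiento => (asiento.lookup "estado").isSome))) = true →
    pyAOuter sala i cantidad = pyBOuter sala i cantidad := by
  intro sala
  induction sala with
  | nil => intro i _; rfl
  | cons fila rest ih =>
    intro i hkey
    rw [List.all_cons, Bool.and_eq_true] at hkey
    obtain ⟨hkfila, hkrest⟩ := hkey
    have hinner := pvInner_eq_scan cantidad fila 0 0 0 hkfila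
    by_cases hc : 0 < cantidad
    · set k := cantidad.toNat with hkdef
      have hk1 : 1 ≤ k := by omega
      have hck : cantidad = (k : Int) := (Int.toNat_of_nonneg (by omega)).symm
      have hscan : pvScan (fila.map pvIsFree) 0 0 0 cantidad
          = (pvWin k (fila.map pvIsFree)).map (fun p : Nat => (p : Int)) := by
        have := pvScan_eq k hk1 (fila.map pvIsFree) 0 0 0 (by omega) (Or.inl rfl)
        simp only [Nat.cast_zero, List.replicate_zero, List.nil_append] at this
        rw [hck]
        rw [this]
        congr 1
        funext p
        ring
      have hfind : PySem.Chars.find (fila.map pyBEstado) (List.replicate k 'L') =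
          (match pvWin k (fila.map pvIsFree) with | some p => (p : Int) | none => -1) := by
        rw [pvStates_eq fila]
        exact pvFind_eq_win k hk1 (fila.map pvIsFree)
      cases hwv : pvWin k (fila.map pvIsFree) with
      | none =>
        have hclean : pyAInner fila 0 0 0 cantidad = .clean := by
          rw [hinner, hscan, hwv]; rfl
        have hfneg : PySem.Chars.find (fila.map pyBEstado) (List.replicate cantidad.toNat 'L')
            = -1 := by rw [← hkdef, hfind, hwv]
        have hA : pyAOuter (fila :: rest) i cantidad = pyAOuter rest (i + 1) cantidad := by
          rw [pyAOuter_cons, hclean]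
        rw [hA, ih (i + 1) hkrest, pyBOuter_cons]
        by_cases hguard : 0 < cantidad ∧ cantidad ≤ (fila.length : Int)
        · rw [if_pos hguard, hfneg]
          simp
        · rw [if_neg hguard]
      | some p =>
        have hfound : pyAInner fila 0 0 0 cantidad = .found (p : Int) := by
          rw [hinner, hscan, hwv]; rfl
        have hfp : PySem.Chars.find (fila.map pyBEstado) (List.replicate cantidad.toNat 'L')
            = (p : Int) := by rw [← hkdef, hfind, hwv]
        have hguard : 0 < cantidad ∧ cantidad ≤ (fila.length : Int) := by
          refine ⟨hc, ?_⟩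
          have hwp := ((pvWin_spec k hk1 (fila.map pvIsFree)).1 p hwv).1
          rw [pvW_iff k hk1] at hwp
          have := hwp.1
          simp only [List.length_map] at this
          omega
        have hne : ((p : Int) ≠ -1) := by omega
        rw [pyAOuter_cons, hfound, pyBOuter_cons, if_pos hguard, hfp, if_pos hne]
    · have hnone : pvScan (fila.map pvIsFree) 0 0 0 cantidad = none :=
        pvScan_nonpos cantidad (by omega) _ 0 0 0 (by omega)
      have hclean : pyAInner fila 0 0 0 cantidad = .clean := by
        rw [hinner, hnone]
      have hguard : ¬ (0 < cantidad ∧ cantidad ≤ (fila.length : Int)) := fun h => hc h.1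
      have hA : pyAOuter (fila :: rest) i cantidad = pyAOuter rest (i + 1) cantidad := by
        rw [pyAOuter_cons, hclean]
      rw [hA, ih (i + 1) hkrest, pyBOuter_cons, if_neg hguard]

-- ===== VERDICT (by name: the statement is the Claim_ definition above) =====
theorem buscar_asientos_juntos_spec : Claim_equal_buscar_asientos_juntos := by
  intro sala cantidad _ hpre
  unfold Spec_buscar_asientos_juntos buscar_asientos_juntos buscar_asientos_juntos_alt
  exact pvOuter_eq cantidad sala 0 hpre
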